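-- pv_equiv track=rewrite | github.com/AashrithPemmaraju06/CareerMap_Innovatex | app.py | skill_gap
-- ===== SOURCE A (Python) =====
-- def skill_gap(user_skills, job_skills):
--     user_list = [s.strip().lower() for s in user_skills.split(",")]
--     job_list = [s.lower() for s in job_skills]
--
--     missing = []
--
--     for j in job_list:
--         found = False
--
--         for u in user_list:
--             # 🔥 STRICTER MATCH (IMPORTANT)
--             if u == j or u in j:
--                 found = True
--                 break
--
--         if not found:
--             missing.append(j)
--
--     return missing
-- ===== SOURCE B (Python) =====
-- def skill_gap(user_skills, job_skills):
--     users = set(s.strip().lower() for s in user_skills.split(","))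
--     lengths = sorted(set(len(u) for u in users))
--
--     def covered(j):
--         n = len(j)
--         for L in lengths:
--             if L > n:
--                 break
--             for a in range(n - L + 1):
--                 if j[a:a+L] in users:
--                     return True
--         return False
--
--     return [j for j in (s.lower() for s in job_skills) if not covered(j)]
-- ===== Notes on version B (the rewrite author's own statement) =====
-- stated objective: alternative
-- what changed: Instead of scanning every user skill per job with Python's substring operator, B builds a set of user skills once and probes it with each substring of the job string whose length occurs among the user-skill lengths (sorted lengths, early break), so per-job work no longer grows with the number of user skills.
import Mathlib
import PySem

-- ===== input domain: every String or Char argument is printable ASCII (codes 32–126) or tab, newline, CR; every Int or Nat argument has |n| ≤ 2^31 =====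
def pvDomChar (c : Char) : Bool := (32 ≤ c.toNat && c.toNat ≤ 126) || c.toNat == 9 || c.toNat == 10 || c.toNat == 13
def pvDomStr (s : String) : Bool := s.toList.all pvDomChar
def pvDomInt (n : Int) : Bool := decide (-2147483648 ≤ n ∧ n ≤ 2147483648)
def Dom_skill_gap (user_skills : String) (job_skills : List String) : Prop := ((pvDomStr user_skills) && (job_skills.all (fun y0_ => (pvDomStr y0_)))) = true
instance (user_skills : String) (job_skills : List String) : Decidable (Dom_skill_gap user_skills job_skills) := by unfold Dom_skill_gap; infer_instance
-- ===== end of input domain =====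

-- B replaces A's scan of every user skill per job by a set of user skills queried
-- with each substring of the job string (lengths restricted to the user-skill lengths);
-- same return value, different algorithm ('alternative').

-- ===== PORT A =====
-- inner 'for u in user_list: if u == j or u in j: found = True; break'
def sgFound : List String → String → Bool
  | [], _ => false
  | u :: rest, j => if u == j || PySem.Str.isIn u j then true else sgFound rest j

def skill_gap (user_skills : String) (job_skills : List String) : List String :=
  -- user_skills.split(",") : the separator is the literal non-empty ",", so split? is always `some`
  let user_list := ((PySem.Str.split? user_skills ",").getD []).map (fun s => PySem.Str.lower (PySem.Str.strip s))
  let job_list := job_skills.map (fun s => PySem.Str.lower s)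
  job_list.foldl (fun missing j => if !sgFound user_list j then missing ++ [j] else missing) []

-- ===== PORT B =====
-- Source B's 'covered': for L in lengths (break once L > len(j)); for a in range(n-L+1): j[a:a+L] in users
def sgCovered (users : PySem.Set String) (j : String) (n : Int) : List Int → Bool
  | [] => false
  | L :: rest =>
    if n < L then false
    else if (PySem.List.pyRange 0 (n - L + 1) 1).any
           (fun a => PySem.Set.contains users (PySem.Str.slice j (some a) (some (a + L)))) then true
    else sgCovered users j n rest

def skill_gap_alt (user_skills : String) (job_skills : List String) : List String :=
  let users : PySem.Set String := PySem.Set.ofList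
    (((PySem.Str.split? user_skills ",").getD []).map (fun s => PySem.Str.lower (PySem.Str.strip s)))
  let lengths : List Int := PySem.List.sorted (PySem.Set.ofList (users.map (fun u => PySem.Str.len u))) id
  (job_skills.map (fun s => PySem.Str.lower s)).filter
    (fun j => !(sgCovered users j (PySem.Str.len j) lengths))

-- ===== PRECONDITION & SPEC =====
def Spec_skill_gap (user_skills : String) (job_skills : List String) (out : List String) : Prop := out = skill_gap_alt user_skills job_skills
instance (user_skills : String) (job_skills : List String) (out : List String) : Decidable (Spec_skill_gap user_skills job_skills out) := by unfold Spec_skill_gap; infer_instance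

-- ===== CLAIM (what is proved, stated in full; the proofs are below) =====
def Claim_equal_skill_gap : Prop := ∀ (user_skills : String) (job_skills : List String), Dom_skill_gap user_skills job_skills → Spec_skill_gap user_skills job_skills (skill_gap user_skills job_skills)

-- ===== LEMMAS AND PROOFS =====

-- A's inner loop finds a match iff some user skill is an infix of the job string
-- (u == j is subsumed by 'u in j').
lemma sgFound_iff (us : List String) (j : String) :
    sgFound us j = true ↔ ∃ u ∈ us, u.toList <:+: j.toList := by
  induction us with
  | nil => simp [sgFound]
  | cons u rest ih =>
    rw [sgFound]
    by_cases h : (u == j || PySem.Str.isIn u j) = true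
    · simp only [h, if_true, true_iff]
      refine ⟨u, List.mem_cons_self, ?_⟩
      rcases (by simpa using h : u = j ∨ PySem.Str.isIn u j = true) with h1 | h2
      · exact h1 ▸ List.infix_refl _
      · exact (PySem.Str.isIn_iff_infix u j).mp h2
    · have hni : ¬ u.toList <:+: j.toList := by
        intro hinf
        exact h (by rw [(PySem.Str.isIn_iff_infix u j).mpr hinf, Bool.or_true])
      rw [if_neg h, ih]
      constructor
      · rintro ⟨u', hu', hi⟩; exact ⟨u', List.mem_cons_of_mem _ hu', hi⟩
      · rintro ⟨u', hu', hi⟩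
        rcases List.mem_cons.mp hu' with rfl | hm
        · exact absurd hi hni
        · exact ⟨u', hm, hi⟩

-- any slice j[a:a+L] that the inner loop tests is an infix of j
lemma sgCovered_sound (users : PySem.Set String) (j : String) (lens : List Int)
    (h0 : ∀ L ∈ lens, 0 ≤ L)
    (h : sgCovered users j (PySem.Str.len j) lens = true) :
    ∃ u ∈ users, u.toList <:+: j.toList := by
  induction lens with
  | nil => simp [sgCovered] at h
  | cons L rest ih =>
    rw [sgCovered] at h
    split_ifs at h with hn hany
    · rcases List.any_eq_true.mp hany with ⟨a, hamem, hcont⟩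
      have ha : 0 ≤ a ∧ a < PySem.Str.len j - L + 1 := PySem.List.mem_pyRange_one.mp hamem
      have hL : (0:Int) ≤ L := h0 L List.mem_cons_self
      refine ⟨PySem.Str.slice j (some a) (some (a + L)), (PySem.Set.contains_iff _ _).mp hcont, ?_⟩
      rw [PySem.Str.toList_slice, PySem.Chars.slice_eq_listSlice,
        PySem.List.slice_toNat _ ha.1 (by omega)]
      exact (List.take_prefix _ _).isInfix.trans (List.drop_suffix _ _).isInfix
    · exact ih (fun L hL => h0 L (List.mem_cons_of_mem _ hL)) h

-- conversely, a user skill that is an infix of j is found as a slice of j of its own length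
lemma sgCovered_complete (users : PySem.Set String) (j : String) (lens : List Int)
    (hsort : lens.Pairwise (· ≤ ·))
    (u : String) (hu : u ∈ users) (hlen : ((u.toList.length : Int)) ∈ lens)
    (hinf : u.toList <:+: j.toList) :
    sgCovered users j (PySem.Str.len j) lens = true := by
  induction lens with
  | nil => cases hlen
  | cons L rest ih =>
    have hulen : u.toList.length ≤ j.toList.length := hinf.length_le
    have hLle : L ≤ (j.toList.length : Int) := by
      rcases List.mem_cons.mp hlen with heq | hm
      · omega
      · have := (List.pairwise_cons.mp hsort).1 _ hm
        omega
    rw [sgCovered, if_neg (by rw [PySem.Str.len_eq]; omega)]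
    rcases List.mem_cons.mp hlen with heq | hm
    · -- L is u's length: exhibit the start position
      have hisin : PySem.Chars.isIn u.toList j.toList = true :=
        (PySem.Chars.isIn_iff_infix _ _).mpr hinf
      rcases (PySem.Chars.exists_prefix_drop_iff_isIn u.toList j.toList).mpr hisin with ⟨t, hpre⟩
      -- normalise t into range
      have ht : ∃ t', t' ≤ j.toList.length - u.toList.length ∧ u.toList <+: j.toList.drop t' := by
        by_cases hle : t ≤ j.toList.length
        · refine ⟨t, ?_, hpre⟩
          have h1 := hpre.length_le
          rw [List.length_drop] at h1
          omega
        · have : u.toList = [] := List.eq_nil_of_prefix_nil (by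
            have : j.toList.drop t = [] := List.drop_eq_nil_of_le (by omega)
            rwa [this] at hpre)
          exact ⟨0, by simp [this], by simp [this]⟩
      rcases ht with ⟨t', ht', hpre'⟩
      have hany : (PySem.List.pyRange 0 (PySem.Str.len j - L + 1) 1).any
          (fun a => PySem.Set.contains users (PySem.Str.slice j (some a) (some (a + L)))) = true := by
        refine List.any_eq_true.mpr ⟨(t' : Int), ?_, ?_⟩
        · refine PySem.List.mem_pyRange_one.mpr ⟨by positivity, ?_⟩
          rw [PySem.Str.len_eq]
          omega
        · refine (PySem.Set.contains_iff _ _).mpr ?_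
          have hslice : PySem.Str.slice j (some (t' : Int)) (some ((t' : Int) + L)) = u := by
            rw [← String.toList_inj, PySem.Str.toList_slice, PySem.Chars.slice_eq_listSlice,
              PySem.List.slice_toNat _ (by positivity) (by omega)]
            have htn : ((t' : Int) + L).toNat - ((t' : Int)).toNat = u.toList.length := by omega
            rw [htn]
            exact ((List.prefix_iff_eq_take.mp hpre')).symm
          rw [hslice]; exact hu
      rw [if_pos hany]
    · by_cases hany : (PySem.List.pyRange 0 (PySem.Str.len j - L + 1) 1).any
          (fun a => PySem.Set.contains users (PySem.Str.slice j (some a) (some (a + L)))) = true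
      · rw [if_pos hany]
      · rw [if_neg hany]
        exact ih (List.pairwise_cons.mp hsort).2 hm

-- ===== VERDICT (by name: the statement is the Claim_ definition above) =====
theorem skill_gap_spec : Claim_equal_skill_gap := by
  intro user_skills job_skills _
  unfold Spec_skill_gap skill_gap skill_gap_alt
  dsimp only
  set user_list := ((PySem.Str.split? user_skills ",").getD []).map
    (fun s => PySem.Str.lower (PySem.Str.strip s)) with hul
  set users : PySem.Set String := PySem.Set.ofList user_list with husers
  set lengths : List Int :=
    PySem.List.sorted (PySem.Set.ofList (users.map (fun u => PySem.Str.len u))) id with hlens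
  have hfold := PySem.List.foldl_append_if (fun j => !sgFound user_list j) (id : String → String)
    (job_skills.map (fun s => PySem.Str.lower s)) []
  simp only [id_eq, List.map_id, List.nil_append] at hfold
  rw [hfold]
  refine List.filter_congr ?_
  intro j _
  congr 1
  rw [Bool.eq_iff_iff, sgFound_iff]
  constructor
  · rintro ⟨u, hu, hinf⟩
    refine sgCovered_complete users j lengths ?_ u ((PySem.Set.mem_ofList _ _).mpr hu) ?_ hinf
    · have := PySem.List.sorted_pairwise (PySem.Set.ofList (users.map (fun u => PySem.Str.len u))) (id : Int → Int)
      simpa using this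
    · rw [PySem.List.mem_sorted, PySem.Set.mem_ofList]
      exact List.mem_map.mpr ⟨u, (PySem.Set.mem_ofList _ _).mpr hu, (PySem.Str.len_eq u).symm⟩
  · intro h
    have h0 : ∀ L ∈ lengths, 0 ≤ L := by
      intro L hL
      rw [hlens, PySem.List.mem_sorted, PySem.Set.mem_ofList] at hL
      rcases List.mem_map.mp hL with ⟨u, _, rfl⟩
      rw [PySem.Str.len_eq]; positivity
    rcases sgCovered_sound users j lengths h0 h with ⟨u, hu, hinf⟩
    exact ⟨u, (PySem.Set.mem_ofList _ _).mp hu, hinf⟩
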